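-- pv_equiv track=rewrite | github.com/benchan777/random-leetcode-problems | numberOfConnections.py | numberOfConnections
-- ===== SOURCE A (Python) =====
-- def numberOfConnections(gridOfNodes):
--   total_connections = 0
--   node_dict = {}
--
--   for i in range(len(gridOfNodes)):
--     node_dict[i] = 0
--     for node in gridOfNodes[i]:
--       if node == 1:
--         node_dict[i] += 1
--
--   i = 0
--   last_node_count = 0
--
--   while i < len(gridOfNodes) - 1:
--     if node_dict[i] != 0:
--       last_node_count = node_dict[i]
--
--     total_connections += (last_node_count * node_dict[i + 1])
--     i += 1
--
--   return total_connections
-- ===== SOURCE B (Python) =====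
-- def numberOfConnections(gridOfNodes):
--     nonzero_counts = [c for c in (row.count(1) for row in gridOfNodes) if c != 0]
--     return sum(a * b for a, b in zip(nonzero_counts, nonzero_counts[1:]))
-- ===== Notes on version B (the rewrite author's own statement) =====
-- stated objective: alternative
-- what changed: Replaced A's dict-building pass plus index-based while loop with a stateless carry variable by: compute each row's count of 1s, drop the zero counts, and sum the products of adjacent elements of that filtered list (zip with its tail) - zero rows never enter the pairing at all instead of being skipped via a carried last_node_count.
import Mathlib
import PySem

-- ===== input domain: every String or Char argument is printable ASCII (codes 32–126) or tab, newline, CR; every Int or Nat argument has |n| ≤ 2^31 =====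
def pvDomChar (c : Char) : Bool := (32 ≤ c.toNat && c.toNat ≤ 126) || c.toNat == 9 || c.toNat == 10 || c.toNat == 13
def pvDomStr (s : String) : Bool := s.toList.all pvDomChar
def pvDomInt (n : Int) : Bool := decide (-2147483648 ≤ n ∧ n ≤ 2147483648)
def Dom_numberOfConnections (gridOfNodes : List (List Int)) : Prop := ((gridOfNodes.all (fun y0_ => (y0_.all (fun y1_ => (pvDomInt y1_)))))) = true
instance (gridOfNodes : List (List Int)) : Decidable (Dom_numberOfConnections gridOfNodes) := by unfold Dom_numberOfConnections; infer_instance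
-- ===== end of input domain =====

-- B replaces A's dict pass + carry-variable while loop by filtering out the zero
-- per-row counts and summing products of adjacent elements of the filtered list;
-- objective: alternative (zero rows vanish instead of being skipped via a carry).

-- ===== PORT A =====
-- body of A's first for-loop (count the 1s of row i into node_dict[i])
def pvStepA (g : List (List Int)) (d : PySem.Dict Int Int) (i : Int) : PySem.Dict Int Int :=
  (PySem.List.pyGetD g i []).foldl
    (fun d node => if node == 1 then d.insert i (d.getD i 0 + 1) else d)
    (d.insert i 0)

-- body of A's while loop; state = (last_node_count, total_connections)
def pvStepW (d : PySem.Dict Int Int) (st : Int × Int) (i : Int) : Int × Int :=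
  ((if d.getD i 0 ≠ 0 then d.getD i 0 else st.1),
   st.2 + (if d.getD i 0 ≠ 0 then d.getD i 0 else st.1) * d.getD (i + 1) 0)

def numberOfConnections (gridOfNodes : List (List Int)) : Int :=
  let n : Int := gridOfNodes.length
  let node_dict : PySem.Dict Int Int :=
    (PySem.List.pyRange 0 n 1).foldl (pvStepA gridOfNodes) PySem.Dict.empty
  ((PySem.List.pyRange 0 (n - 1) 1).foldl (pvStepW node_dict) (0, 0)).2

-- ===== PORT B =====
def numberOfConnections_alt (gridOfNodes : List (List Int)) : Int :=
  let nonzero_counts : List Int :=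
    ((gridOfNodes.map (fun row => (PySem.List.count row 1 : Int))).filter (fun c => c != 0))
  (List.zipWith (· * ·) nonzero_counts nonzero_counts.tail).sum

-- ===== PRECONDITION & SPEC =====
def Spec_numberOfConnections (gridOfNodes : List (List Int)) (out : Int) : Prop := out = numberOfConnections_alt gridOfNodes
instance (gridOfNodes : List (List Int)) (out : Int) : Decidable (Spec_numberOfConnections gridOfNodes out) := by unfold Spec_numberOfConnections; infer_instance

-- ===== CLAIM (what is proved, stated in full; the proofs are below) =====
def Claim_equal_numberOfConnections : Prop := ∀ (gridOfNodes : List (List Int)), Dom_numberOfConnections gridOfNodes → Spec_numberOfConnections gridOfNodes (numberOfConnections gridOfNodes)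

-- ===== LEMMAS AND PROOFS =====

-- count of 1s in a row
def pvCnt (row : List Int) : Int := (row.count 1 : Int)

-- A's pairing recursion over a list of counts
def pvH : Int → List Int → Int
  | _, [] => 0
  | _, [_] => 0
  | last, c :: next :: rest =>
      (if c ≠ 0 then c else last) * next + pvH (if c ≠ 0 then c else last) (next :: rest)

-- A's pairing recursion rephrased on non-first counts
def pvH' : Int → List Int → Int
  | _, [] => 0
  | last, c :: rest => last * c + pvH' (if c ≠ 0 then c else last) rest

-- sum of products of adjacent elements
def pvAdj : List Int → Int
  | [] => 0
  | [_] => 0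
  | a :: b :: rest => a * b + pvAdj (b :: rest)

lemma pvH_eq_pvH' (r : List Int) : ∀ (last c : Int),
    pvH last (c :: r) = pvH' (if c ≠ 0 then c else last) r := by
  induction r with
  | nil => intro last c; simp [pvH, pvH']
  | cons next rest ih =>
      intro last c
      simp only [pvH, pvH']
      rw [ih (if c ≠ 0 then c else last) next]

lemma pvH_short (last : Int) (l : List Int) (h : l.length ≤ 1) : pvH last l = 0 := by
  match l, h with
  | [], _ => rfl
  | [_], _ => rfl

lemma pvAdj_zero_cons (l : List Int) : pvAdj (0 :: l) = pvAdj l := by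
  cases l with
  | nil => rfl
  | cons b r => simp [pvAdj]

-- pvH' is the adjacent-product sum of (last :: the nonzero suffix counts)
lemma pvH'_eq_pvAdj (l : List Int) : ∀ (last : Int),
    pvH' last l = pvAdj (last :: l.filter (fun c => c != 0)) := by
  induction l with
  | nil => intro last; simp [pvH', pvAdj]
  | cons c r ih =>
      intro last
      by_cases hc : c = 0
      · subst hc
        have h1 : pvH' last (0 :: r) = last * 0 + pvH' last r := by simp [pvH']
        have h2 : List.filter (fun c => c != 0) ((0 : Int) :: r)
            = List.filter (fun c => c != 0) r := by simp [List.filter_cons]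
        rw [h1, h2, ih last]; ring
      · have hb : ((c != (0 : Int)) = true) := by simp [hc]
        simp only [pvH', if_pos hc, List.filter_cons, hb, if_true]
        rw [ih c]
        simp [pvAdj]

-- A's whole computation equals pvH 0 over the per-row counts
lemma pvH_eq_pvAdj (l : List Int) :
    pvH 0 l = pvAdj (l.filter (fun c => c != 0)) := by
  cases l with
  | nil => rfl
  | cons c r =>
      rw [pvH_eq_pvH' r 0 c, pvH'_eq_pvAdj]
      by_cases hc : c = 0
      · subst hc
        simp [pvAdj_zero_cons, List.filter_cons]
      · have hb : ((c != (0 : Int)) = true) := by simp [hc]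
        simp [List.filter_cons, hb, if_pos hc]

-- adjacent-product sum as zipWith with the tail (B's zip)
lemma zip_eq_pvAdj (l : List Int) :
    (List.zipWith (· * ·) l l.tail).sum = pvAdj l := by
  induction l with
  | nil => rfl
  | cons a r ih =>
      cases r with
      | nil => rfl
      | cons b t =>
          simp only [List.tail_cons, List.zipWith_cons_cons, List.sum_cons, pvAdj]
          rw [← ih]
          simp

-- the inner counting fold of A, pointwise on the dict
lemma innerA (row : List Int) : ∀ (d : PySem.Dict Int Int) (i j : Int),
    ((row.foldl (fun d node => if node == 1 then d.insert i (d.getD i 0 + 1) else d) d).getD j 0)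
      = if j = i then d.getD i 0 + (row.count 1 : Int) else d.getD j 0 := by
  induction row with
  | nil => intro d i j; by_cases h : j = i <;> simp [h]
  | cons x t ih =>
      intro t_d i j
      by_cases hx : x = 1
      · subst hx
        simp only [List.foldl_cons, beq_self_eq_true, if_true]
        rw [ih]
        by_cases hji : j = i
        · subst hji
          simp [PySem.Dict.getD_insert_self]
          ring
        · rw [if_neg hji, if_neg hji, PySem.Dict.getD_insert_of_ne _ _ _ hji]
      · have hb : (x == (1 : Int)) = false := by simp [hx]
        simp only [List.foldl_cons, hb, Bool.false_eq_true, if_false]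
        rw [ih]
        simp [hx]

-- one outer step of A's first loop, pointwise
lemma stepA_getD (g : List (List Int)) (d : PySem.Dict Int Int) (i j : Int) :
    (pvStepA g d i).getD j 0
      = if j = i then ((PySem.List.pyGetD g i []).count 1 : Int) else d.getD j 0 := by
  unfold pvStepA
  rw [innerA]
  by_cases h : j = i
  · simp [h, PySem.Dict.getD_insert_self]
  · simp [h, PySem.Dict.getD_insert_of_ne _ _ _ h]

-- the dict A builds, pointwise
lemma buildA (g : List (List Int)) (j : Nat) (hj : j < g.length) :
    (((PySem.List.pyRange 0 (g.length : Int) 1).foldl (pvStepA g) PySem.Dict.empty).getD (j : Int) 0)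
      = pvCnt (g[j]) := by
  induction g using List.reverseRecOn with
  | nil => simp at hj
  | append_singleton g' row ih =>
      have hlen : (((g' ++ [row]).length : Int)) = (g'.length : Int) + 1 := by
        simp
      rw [hlen, PySem.List.pyRange_one_succ_right (by positivity), List.foldl_append]
      have hcongr : List.foldl (pvStepA (g' ++ [row])) PySem.Dict.empty
            (PySem.List.pyRange 0 (g'.length : Int) 1)
          = List.foldl (pvStepA g') PySem.Dict.empty
            (PySem.List.pyRange 0 (g'.length : Int) 1) := by
        apply PySem.List.foldl_congr_mem
        intro acc x hx
        rw [PySem.List.mem_pyRange_one] at hx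
        have hx0 : 0 ≤ x := hx.1
        have hx1 : x.toNat < g'.length := by omega
        unfold pvStepA
        rw [PySem.List.pyGetD_of_nonneg _ _ hx0, PySem.List.pyGetD_of_nonneg _ _ hx0]
        rw [List.getD_eq_getElem _ _ (by simp [List.length_append]; omega),
            List.getD_eq_getElem _ _ (by exact hx1)]
        simp [List.getElem_append_left hx1]
      simp only [List.foldl_cons, List.foldl_nil]
      have hrow : PySem.List.pyGetD (g' ++ [row]) (g'.length : Int) [] = row := by
        rw [PySem.List.pyGetD_of_nonneg _ _ (by positivity)]
        rw [List.getD_eq_getElem _ _ (by simp)]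
        simp
      rw [stepA_getD, hrow]
      by_cases hje : j = g'.length
      · subst hje
        simp [pvCnt, List.getElem_append_right]
      · have hj' : j < g'.length := by
          simp [List.length_append] at hj; omega
        have hne : (j : Int) ≠ (g'.length : Int) := by
          exact_mod_cast hje
        rw [if_neg hne, hcongr, ih hj']
        simp [List.getElem_append_left hj']

-- A's while loop, as pvH over the counts
lemma loopA (g : List (List Int)) (d : PySem.Dict Int Int)
    (hd : ∀ (j : Nat) (hj : j < g.length), d.getD (j : Int) 0 = pvCnt (g[j])) :
    ∀ (k : Nat) (a last total : Int), 0 ≤ a → ((g.length : Int) - 1 - a).toNat = k →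
    ((PySem.List.pyRange a ((g.length : Int) - 1) 1).foldl (pvStepW d) (last, total)).2
      = total + pvH last ((g.map pvCnt).drop a.toNat) := by
  intro k
  induction k with
  | zero =>
      intro a last total ha hk
      have hend : (g.length : Int) - 1 ≤ a := by omega
      rw [PySem.List.pyRange_one_eq_nil hend]
      have hlen : ((g.map pvCnt).drop a.toNat).length ≤ 1 := by
        simp [List.length_drop]; omega
      simp [pvH_short _ _ hlen]
  | succ k ih =>
      intro a last total ha hk
      have hlt : a < (g.length : Int) - 1 := by omega
      rw [PySem.List.pyRange_one_cons hlt, List.foldl_cons]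
      have ha1 : a.toNat < g.length := by omega
      have ha2 : a.toNat + 1 < g.length := by omega
      have hga : d.getD a 0 = pvCnt (g[a.toNat]) := by
        have h := hd a.toNat ha1
        rwa [Int.toNat_of_nonneg ha] at h
      have hga1 : d.getD (a + 1) 0 = pvCnt (g[a.toNat + 1]) := by
        have h := hd (a.toNat + 1) ha2
        have he : ((a.toNat + 1 : Nat) : Int) = a + 1 := by omega
        rwa [he] at h
      have hstep : pvStepW d (last, total) a
          = ((if pvCnt (g[a.toNat]) ≠ 0 then pvCnt (g[a.toNat]) else last),
             total + (if pvCnt (g[a.toNat]) ≠ 0 then pvCnt (g[a.toNat]) else last)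
               * pvCnt (g[a.toNat + 1])) := by
        simp [pvStepW, hga, hga1]
      rw [hstep, ih (a + 1) _ _ (by omega) (by omega)]
      have hd1 : (g.map pvCnt).drop a.toNat
          = pvCnt (g[a.toNat]) :: (g.map pvCnt).drop (a.toNat + 1) := by
        rw [List.drop_eq_getElem_cons (by simpa using ha1)]
        simp
      have hd2 : (g.map pvCnt).drop (a.toNat + 1)
          = pvCnt (g[a.toNat + 1]) :: (g.map pvCnt).drop (a.toNat + 2) := by
        rw [List.drop_eq_getElem_cons (by simpa using ha2)]
        simp
      have he1 : (a + 1).toNat = a.toNat + 1 := by omega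
      rw [he1, hd1, hd2]
      simp only [pvH]
      rw [← hd2]
      ring

-- ===== VERDICT (by name: the statement is the Claim_ definition above) =====
theorem numberOfConnections_spec : Claim_equal_numberOfConnections := by
  intro g _
  unfold Spec_numberOfConnections numberOfConnections numberOfConnections_alt
  rw [loopA g _ (fun j hj => buildA g j hj)
      (((g.length : Int) - 1 - 0).toNat) 0 0 0 le_rfl rfl]
  simp only [Int.toNat_zero, List.drop_zero, zero_add]
  rw [pvH_eq_pvAdj, zip_eq_pvAdj]
  have hm : g.map pvCnt = g.map (fun row => (PySem.List.count row 1 : Int)) := by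
    apply List.map_congr_left
    intro row _
    simp [pvCnt, PySem.List.count]
  rw [hm]
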